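-- pv_equiv track=rewrite | github.com/esallen-amzn/amazon-bedrock-agents-healthcare-lifesciences-customized | instrument-diagnosis-assistant/agent/agent_config/tools/component_recognition_tools.py | _create_relationship_matrix
-- ===== SOURCE A (Python) =====
-- from typing import Dict, List, Any, Optional, Set, Tuple
--
-- def _create_relationship_matrix(relationships: Dict[str, List[Dict]], component_names: List[str]) -> Dict[str, Dict[str, str]]:
--     """Create a relationship matrix"""
--     matrix = {}
--
--     for comp1 in component_names:
--         matrix[comp1] = {}
--         for comp2 in component_names:
--             if comp1 == comp2:
--                 matrix[comp1][comp2] = "self"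
--             else:
--                 # Find relationship type
--                 rel_type = "none"
--                 if comp1 in relationships:
--                     for rel in relationships[comp1]:
--                         if rel['target'] == comp2:
--                             rel_type = rel['type']
--                             break
--                 matrix[comp1][comp2] = rel_type
--
--     return matrix
-- ===== SOURCE B (Python) =====
-- def _create_relationship_matrix(relationships, component_names):
--     """Create a relationship matrix: defaults first, then one pass over the edges."""
--     valid = set(component_names)
--     matrix = {c1: {c2: ("self" if c1 == c2 else "none") for c2 in component_names}
--               for c1 in component_names}
--     for source, rels in relationships.items():
--         if source not in valid:
--             continue
--         row = matrix[source]
--         seen = set()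
--         for rel in rels:
--             target = rel.get('target')
--             if target in valid and target != source and target not in seen:
--                 row[target] = rel['type']
--                 seen.add(target)
--     return matrix
-- ===== Notes on version B (the rewrite author's own statement) =====
-- stated objective: alternative
-- what changed: Instead of scanning the relationship list of comp1 once per (comp1, comp2) pair, B fills the matrix with self/none defaults and then makes a single pass over each valid source's relationship list, writing each target cell on its first occurrence (tracked with a seen-set).
import Mathlib
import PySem

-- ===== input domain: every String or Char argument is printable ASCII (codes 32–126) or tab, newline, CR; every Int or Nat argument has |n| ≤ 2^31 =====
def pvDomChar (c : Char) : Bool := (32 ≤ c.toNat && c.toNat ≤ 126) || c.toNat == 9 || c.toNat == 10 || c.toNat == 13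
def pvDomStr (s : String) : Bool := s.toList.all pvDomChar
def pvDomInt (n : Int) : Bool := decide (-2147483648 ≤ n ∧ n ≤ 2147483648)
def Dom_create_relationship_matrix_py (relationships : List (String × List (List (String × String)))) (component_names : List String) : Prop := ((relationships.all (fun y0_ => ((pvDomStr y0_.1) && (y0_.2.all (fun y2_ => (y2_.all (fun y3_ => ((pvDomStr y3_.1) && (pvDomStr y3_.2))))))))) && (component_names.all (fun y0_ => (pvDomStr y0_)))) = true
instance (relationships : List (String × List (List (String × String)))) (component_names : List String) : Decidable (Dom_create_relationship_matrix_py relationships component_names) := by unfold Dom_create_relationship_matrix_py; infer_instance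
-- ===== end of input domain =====

-- B replaces A's per-(comp1,comp2) scan of each relationship list by a default-filled matrix plus a
-- single pass over each valid source's relationship list (first occurrence per target wins, tracked
-- with a seen-set): an alternative decomposition of the same matrix.
-- ===== PORT A =====
-- A's inner loop 'for rel in relationships[comp1]: if rel['target'] == comp2: rel_type = rel['type']; break'
-- ("" stands for Python's KeyError on a missing 'target'/'type' key; those inputs are excluded by Pre_)
def findRelTypeA (rels : List (List (String × String))) (comp2 : String) : String :=
  match rels with
  | [] => "none"
  | rel :: rest =>
    match (PySem.Dict.mk rel).get? "target" with
    | none => ""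
    | some t =>
      if t == comp2 then ((PySem.Dict.mk rel).get? "type").getD ""
      else findRelTypeA rest comp2

def create_relationship_matrix_py (relationships : List (String × List (List (String × String)))) (component_names : List String) : List (String × List (String × String)) :=
  let rdict : PySem.Dict String (List (List (String × String))) := PySem.Dict.mk relationships
  let matrix : PySem.Dict String (PySem.Dict String String) :=
    component_names.foldl (fun m c1 =>
      m.insert c1 (component_names.foldl (fun row c2 =>
        row.insert c2 (if c1 == c2 then "self"
          else if rdict.contains c1 then findRelTypeA (rdict.getD c1 []) c2 else "none"))
        PySem.Dict.empty)) PySem.Dict.empty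
  matrix.items.map (fun p => (p.1, p.2.items))

-- ===== PORT B =====
-- body of B's inner loop over one source's relationship list; state = (row dict, seen set).
-- 'rel.get("target")' is get?; rel['type'] is only read when the guard holds, which inside Pre_
-- guarantees the key exists ("" never arises there) — it is modelled by skipping when absent.
def applyRowB (valid : PySem.Set String) (src : String)
    (st : PySem.Dict String String × PySem.Set String) (rel : List (String × String)) :
    PySem.Dict String String × PySem.Set String :=
  match (PySem.Dict.mk rel).get? "target" with
  | none => st
  | some tgt =>
    if valid.contains tgt && !(tgt == src) && !(PySem.Set.contains st.2 tgt) then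
      match (PySem.Dict.mk rel).get? "type" with
      | none => st
      | some ty => (st.1.insert tgt ty, PySem.Set.add st.2 tgt)
    else st

def create_relationship_matrix_py_alt (relationships : List (String × List (List (String × String)))) (component_names : List String) : List (String × List (String × String)) :=
  let valid : PySem.Set String := PySem.Set.ofList component_names
  let base : PySem.Dict String (PySem.Dict String String) :=
    component_names.foldl (fun m c1 =>
      m.insert c1 (component_names.foldl (fun row c2 =>
        row.insert c2 (if c1 == c2 then "self" else "none")) PySem.Dict.empty)) PySem.Dict.empty
  let final : PySem.Dict String (PySem.Dict String String) :=
    relationships.foldl (fun m p =>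
      if valid.contains p.1 then
        m.insert p.1 ((p.2.foldl (applyRowB valid p.1) (m.getD p.1 PySem.Dict.empty, PySem.Set.empty)).1)
      else m) base
  final.items.map (fun p => (p.1, p.2.items))

-- ===== PRECONDITION & SPEC =====
-- rowColOK rl c2: A's scan of list rl for column c2 returns without KeyError, stated declaratively:
-- if the first rel matching c2 lies inside the longest target-keyed prefix it must carry 'type',
-- and if no rel of that prefix matches c2 the whole list must be target-keyed.
def rowColOK (rl : List (List (String × String))) (c2 : String) : Bool :=
  match (rl.takeWhile (fun rel => ((PySem.Dict.mk rel).get? "target").isSome)).find?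
      (fun rel => (PySem.Dict.mk rel).get? "target" == some c2) with
  | some rel => ((PySem.Dict.mk rel).get? "type").isSome
  | none => (rl.takeWhile (fun rel => ((PySem.Dict.mk rel).get? "target").isSome)).length == rl.length

-- Pre_ excludes (a) duplicate source keys (the argument stands for a Python dict, which cannot have
-- them — a defensible-corner artefact of the association-list encoding), and (b) exactly the inputs
-- on which A raises KeyError: a valid source row whose scan for some column c2 reaches a rel without
-- 'target' before finding a match, or whose first match for some column lacks 'type'.
def Pre_create_relationship_matrix_py (relationships : List (String × List (List (String × String)))) (component_names : List String) : Prop :=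
  (relationships.map Prod.fst).Nodup ∧
  ∀ p ∈ relationships, p.1 ∈ component_names →
    ∀ c2 ∈ component_names, c2 ≠ p.1 → rowColOK p.2 c2 = true

instance (relationships : List (String × List (List (String × String)))) (component_names : List String) : Decidable (Pre_create_relationship_matrix_py relationships component_names) := by
  unfold Pre_create_relationship_matrix_py; infer_instance

def pvWitness_create_relationship_matrix_py : (List (String × List (List (String × String)))) × List String :=
  ([("a", [[("target", "b"), ("type", "uses")]])], ["a", "b"])

def Spec_create_relationship_matrix_py (relationships : List (String × List (List (String × String)))) (component_names : List String) (out : List (String × List (String × String))) : Prop := out = create_relationship_matrix_py_alt relationships component_names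
instance (relationships : List (String × List (List (String × String)))) (component_names : List String) (out : List (String × List (String × String))) : Decidable (Spec_create_relationship_matrix_py relationships component_names out) := by unfold Spec_create_relationship_matrix_py; infer_instance

-- ===== CLAIM (what is proved, stated in full; the proofs are below) =====
def Claim_equal_create_relationship_matrix_py : Prop := ∀ (relationships : List (String × List (List (String × String)))) (component_names : List String), Dom_create_relationship_matrix_py relationships component_names → Pre_create_relationship_matrix_py relationships component_names → Spec_create_relationship_matrix_py relationships component_names (create_relationship_matrix_py relationships component_names)

-- ===== LEMMAS AND PROOFS =====

def buildD {ν : Type} (l : List String) (f : String → ν) (d : PySem.Dict String ν) : PySem.Dict String ν :=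
  l.foldl (fun m c => m.insert c (f c)) d

theorem getD_buildD {ν : Type} (l : List String) (f : String → ν) (d : PySem.Dict String ν)
    (c : String) (dflt : ν) :
    (buildD l f d).getD c dflt = if c ∈ l then f c else d.getD c dflt := by
  induction l generalizing d with
  | nil => simp [buildD]
  | cons x xs ih =>
    simp only [buildD, List.foldl_cons] at *
    rw [ih]
    by_cases hx : c ∈ xs
    · simp [hx, List.mem_cons]
    · by_cases hcx : c = x
      · subst hcx; simp [hx, PySem.Dict.getD_insert_self]
      · simp [hx, hcx, PySem.Dict.getD_insert_of_ne (hne := hcx)]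

theorem keys_buildD {ν : Type} (l : List String) (f : String → ν) (d : PySem.Dict String ν) :
    (buildD l f d).keys = PySem.Set.update d.keys l := by
  exact PySem.Dict.keys_foldl_insert l (fun _ c => f c) d

theorem buildD_congr {ν : Type} (l : List String) (f g : String → ν) (d : PySem.Dict String ν)
    (h : ∀ c ∈ l, f c = g c) : buildD l f d = buildD l g d := by
  induction l generalizing d with
  | nil => rfl
  | cons x xs ih =>
    simp only [buildD, List.foldl_cons]
    rw [h x (by simp)]
    exact ih _ (fun c hc => h c (by simp [hc]))

-- B's value for cell c2 of one row, read off its single pass (given c2 not yet seen):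
-- first rel carrying target = c2 and a type wins
def bcell (rl : List (List (String × String))) (c2 : String) : Option String :=
  match rl with
  | [] => none
  | rel :: rest =>
    match (PySem.Dict.mk rel).get? "target" with
    | none => bcell rest c2
    | some t =>
      if t == c2 then
        match (PySem.Dict.mk rel).get? "type" with
        | some ty => some ty
        | none => bcell rest c2
      else bcell rest c2

theorem findA_eq_bcell (rl : List (List (String × String))) (c2 : String)
    (h : rowColOK rl c2 = true) :
    findRelTypeA rl c2 = (bcell rl c2).getD "none" := by
  induction rl with
  | nil => rfl
  | cons rel rest ih =>
    cases hgt : (PySem.Dict.mk rel).get? "target" with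
    | none =>
      exfalso
      simp only [rowColOK, List.takeWhile_cons, hgt, Option.isSome_none] at h
      simp at h
    | some t =>
      have hpfx : (rel :: rest).takeWhile (fun r => ((PySem.Dict.mk r).get? "target").isSome)
          = rel :: rest.takeWhile (fun r => ((PySem.Dict.mk r).get? "target").isSome) := by
        simp [hgt]
      by_cases htc : t = c2
      · subst htc
        have hfind : ((rel :: rest).takeWhile
              (fun r => ((PySem.Dict.mk r).get? "target").isSome)).find?
              (fun r => (PySem.Dict.mk r).get? "target" == some t) = some rel := by
          rw [hpfx]
          apply List.find?_cons_of_pos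
          simp [hgt]
        rw [rowColOK, hfind] at h
        obtain ⟨ty, hty⟩ := Option.isSome_iff_exists.mp h
        simp [findRelTypeA, bcell, hgt, hty]
      · have hfind : ((rel :: rest).takeWhile
              (fun r => ((PySem.Dict.mk r).get? "target").isSome)).find?
              (fun r => (PySem.Dict.mk r).get? "target" == some c2)
            = (rest.takeWhile (fun r => ((PySem.Dict.mk r).get? "target").isSome)).find?
              (fun r => (PySem.Dict.mk r).get? "target" == some c2) := by
          rw [hpfx]
          apply List.find?_cons_of_neg
          simp [hgt, htc]
        have hrest : rowColOK rest c2 = true := by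
          rw [rowColOK, hfind] at h
          rw [rowColOK]
          cases hf : (rest.takeWhile (fun r => ((PySem.Dict.mk r).get? "target").isSome)).find?
              (fun r => (PySem.Dict.mk r).get? "target" == some c2) with
          | some r => rw [hf] at h; exact h
          | none =>
            rw [hf] at h
            rw [hpfx] at h
            simpa using h
        have hne : (t == c2) = false := beq_eq_false_iff_ne.mpr htc
        simp only [findRelTypeA, bcell, hgt, hne, Bool.false_eq_true, if_false]
        exact ih hrest

theorem contains_add_of_ne (s : PySem.Set String) (x y : String) (h : x ≠ y) :
    PySem.Set.contains (PySem.Set.add s y) x = PySem.Set.contains s x := by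
  simp only [PySem.Set.contains, PySem.Set.add]
  split <;> simp [h]

theorem contains_add_self (s : PySem.Set String) (x : String) :
    PySem.Set.contains (PySem.Set.add s x) x = true := by
  simp only [PySem.Set.contains, PySem.Set.add]
  split <;> simp_all

theorem contains_ofList (l : List String) (x : String) :
    PySem.Set.contains (PySem.Set.ofList l) x = decide (x ∈ l) := by
  simp [PySem.Set.contains, PySem.Set.mem_ofList]

theorem applyRowB_fold_getD_src (comps : List String) (src : String)
    (s : List (List (String × String))) (row : PySem.Dict String String) (seen : PySem.Set String)
    (dflt : String) :
    ((s.foldl (applyRowB (PySem.Set.ofList comps) src) (row, seen)).1).getD src dflt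
      = row.getD src dflt := by
  induction s generalizing row seen with
  | nil => rfl
  | cons rel rest ih =>
    simp only [List.foldl_cons]
    cases hgt : (PySem.Dict.mk rel).get? "target" with
    | none => rw [show applyRowB (PySem.Set.ofList comps) src (row, seen) rel = (row, seen) by
                simp [applyRowB, hgt]]; exact ih row seen
    | some tgt =>
      by_cases hc : ((PySem.Set.ofList comps).contains tgt && !(tgt == src)
          && !(PySem.Set.contains seen tgt)) = true
      · cases hty : (PySem.Dict.mk rel).get? "type" with
        | none => rw [show applyRowB (PySem.Set.ofList comps) src (row, seen) rel = (row, seen) by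
                    simp only [applyRowB, hgt]; rw [if_pos hc, hty]]; exact ih row seen
        | some ty =>
          have htgt : src ≠ tgt := by
            simp only [Bool.and_eq_true, Bool.not_eq_eq_eq_not, Bool.not_true, beq_eq_false_iff_ne] at hc
            exact (Ne.symm hc.1.2)
          rw [show applyRowB (PySem.Set.ofList comps) src (row, seen) rel
                = (row.insert tgt ty, PySem.Set.add seen tgt) by
                  simp only [applyRowB, hgt]; rw [if_pos hc, hty]]
          rw [ih]
          simp [PySem.Dict.getD_insert_of_ne (hne := htgt)]
      · rw [show applyRowB (PySem.Set.ofList comps) src (row, seen) rel = (row, seen) by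
            simp only [applyRowB, hgt]; rw [if_neg hc]]
        exact ih row seen

theorem applyRowB_fold_getD (comps : List String) (src : String)
    (s : List (List (String × String))) (row : PySem.Dict String String) (seen : PySem.Set String)
    (dflt c2 : String) (hc2 : c2 ∈ comps) (hne : c2 ≠ src) :
    ((s.foldl (applyRowB (PySem.Set.ofList comps) src) (row, seen)).1).getD c2 dflt
      = if PySem.Set.contains seen c2 then row.getD c2 dflt
        else match bcell s c2 with
             | some ty => ty
             | none => row.getD c2 dflt := by
  induction s generalizing row seen with
  | nil => split <;> rfl
  | cons rel rest ih =>
    simp only [List.foldl_cons]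
    cases hgt : (PySem.Dict.mk rel).get? "target" with
    | none =>
      rw [show applyRowB (PySem.Set.ofList comps) src (row, seen) rel = (row, seen) by
          simp [applyRowB, hgt]]
      rw [ih row seen, show bcell (rel :: rest) c2 = bcell rest c2 by simp [bcell, hgt]]
    | some t =>
      by_cases htc : t = c2
      · subst htc
        have hvc : (PySem.Set.ofList comps).contains t = true := by
          rw [contains_ofList]; exact decide_eq_true hc2
        have hts : (!(t == src)) = true := by simp [hne]
        by_cases hseen : PySem.Set.contains seen t = true
        · rw [show applyRowB (PySem.Set.ofList comps) src (row, seen) rel = (row, seen) by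
              simp only [applyRowB, hgt]; rw [if_neg (by rw [hseen]; simp)]]
          rw [ih row seen, if_pos hseen, if_pos hseen]
        · cases hty : (PySem.Dict.mk rel).get? "type" with
          | none =>
            rw [show applyRowB (PySem.Set.ofList comps) src (row, seen) rel = (row, seen) by
                simp only [applyRowB, hgt]
                rw [if_pos (by rw [hvc, hts, eq_false_of_ne_true hseen]; rfl), hty]]
            rw [ih row seen, show bcell (rel :: rest) t = bcell rest t by
              simp [bcell, hgt, hty]]
          | some ty =>
            rw [show applyRowB (PySem.Set.ofList comps) src (row, seen) rel
                  = (row.insert t ty, PySem.Set.add seen t) by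
                simp only [applyRowB, hgt]
                rw [if_pos (by rw [hvc, hts, eq_false_of_ne_true hseen]; rfl), hty]]
            rw [ih _ _, if_pos (contains_add_self seen t),
              if_neg hseen, PySem.Dict.getD_insert_self]
            simp [bcell, hgt, hty]
      · have hbc : bcell (rel :: rest) c2 = bcell rest c2 := by
          simp [bcell, hgt, beq_eq_false_iff_ne.mpr htc]
        by_cases hc : ((PySem.Set.ofList comps).contains t && !(t == src)
            && !(PySem.Set.contains seen t)) = true
        · cases hty : (PySem.Dict.mk rel).get? "type" with
          | none =>
            rw [show applyRowB (PySem.Set.ofList comps) src (row, seen) rel = (row, seen) by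
                simp only [applyRowB, hgt]; rw [if_pos hc, hty]]
            rw [ih row seen, hbc]
          | some ty =>
            rw [show applyRowB (PySem.Set.ofList comps) src (row, seen) rel
                  = (row.insert t ty, PySem.Set.add seen t) by
                simp only [applyRowB, hgt]; rw [if_pos hc, hty]]
            rw [ih _ _, hbc, contains_add_of_ne seen c2 t (fun h => htc h.symm)]
            rw [PySem.Dict.getD_insert_of_ne (hne := fun (h : c2 = t) => htc h.symm)]
        · rw [show applyRowB (PySem.Set.ofList comps) src (row, seen) rel = (row, seen) by
              simp only [applyRowB, hgt]; rw [if_neg hc]]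
          rw [ih row seen, hbc]

theorem applyRowB_fold_keys (comps : List String) (src : String)
    (s : List (List (String × String))) (row : PySem.Dict String String) (seen : PySem.Set String)
    (hk : row.keys = PySem.List.dedup comps) :
    ((s.foldl (applyRowB (PySem.Set.ofList comps) src) (row, seen)).1).keys
      = PySem.List.dedup comps := by
  induction s generalizing row seen with
  | nil => exact hk
  | cons rel rest ih =>
    simp only [List.foldl_cons]
    cases hgt : (PySem.Dict.mk rel).get? "target" with
    | none => rw [show applyRowB (PySem.Set.ofList comps) src (row, seen) rel = (row, seen) by
                simp [applyRowB, hgt]]; exact ih row seen hk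
    | some tgt =>
      by_cases hc : ((PySem.Set.ofList comps).contains tgt && !(tgt == src)
          && !(PySem.Set.contains seen tgt)) = true
      · cases hty : (PySem.Dict.mk rel).get? "type" with
        | none => rw [show applyRowB (PySem.Set.ofList comps) src (row, seen) rel = (row, seen) by
                    simp only [applyRowB, hgt]; rw [if_pos hc, hty]]; exact ih row seen hk
        | some ty =>
          rw [show applyRowB (PySem.Set.ofList comps) src (row, seen) rel
                = (row.insert tgt ty, PySem.Set.add seen tgt) by
              simp only [applyRowB, hgt]; rw [if_pos hc, hty]]
          apply ih
          have htm : tgt ∈ comps := by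
            have := (Bool.and_eq_true _ _).mp ((Bool.and_eq_true _ _).mp hc).1
            have h2 := this.1
            rw [contains_ofList] at h2
            exact of_decide_eq_true h2
          rw [PySem.Dict.keys_insert_of_contains, hk]
          rw [PySem.Dict.contains_iff_mem_keys, hk]
          exact (PySem.List.mem_dedup _ _).mpr htm
      · rw [show applyRowB (PySem.Set.ofList comps) src (row, seen) rel = (row, seen) by
            simp only [applyRowB, hgt]; rw [if_neg hc]]
        exact ih row seen hk

theorem keys_buildD_empty {ν : Type} (l : List String) (f : String → ν) :
    (buildD l f PySem.Dict.empty).keys = PySem.List.dedup l := by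
  rw [keys_buildD]
  simp [PySem.Dict.keys_empty, PySem.List.dedup_eq_ofList]
  rfl

theorem row_eq (comps : List String) (c1 : String) (rl : List (List (String × String)))
    (hc1 : c1 ∈ comps) (hok : ∀ c2 ∈ comps, c2 ≠ c1 → rowColOK rl c2 = true) :
    ((rl.foldl (applyRowB (PySem.Set.ofList comps) c1)
        (buildD comps (fun c2 => if c1 == c2 then "self" else "none") PySem.Dict.empty,
         PySem.Set.empty)).1)
      = buildD comps (fun c2 => if c1 == c2 then "self" else findRelTypeA rl c2) PySem.Dict.empty := by
  have hkL : ((rl.foldl (applyRowB (PySem.Set.ofList comps) c1)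
        (buildD comps (fun c2 => if c1 == c2 then "self" else "none") PySem.Dict.empty,
         PySem.Set.empty)).1).keys = PySem.List.dedup comps :=
    applyRowB_fold_keys comps c1 rl _ _ (keys_buildD_empty _ _)
  have hkR := keys_buildD_empty comps (fun c2 => if c1 == c2 then "self" else findRelTypeA rl c2)
  apply PySem.Dict.ext
  rw [PySem.Dict.items_eq_map_keys _ (by rw [hkL]; exact PySem.List.nodup_dedup _) "",
      PySem.Dict.items_eq_map_keys _ (by rw [hkR]; exact PySem.List.nodup_dedup _) ""]
  rw [hkL, hkR]
  apply List.map_congr_left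
  intro c2 hc2d
  have hc2 : c2 ∈ comps := (PySem.List.mem_dedup _ _).mp hc2d
  by_cases hcc : c2 = c1
  · subst hcc
    rw [applyRowB_fold_getD_src, getD_buildD, getD_buildD]
    simp [hc2]
  · rw [applyRowB_fold_getD comps c1 rl _ _ "" c2 hc2 hcc]
    rw [show PySem.Set.contains PySem.Set.empty c2 = false from rfl]
    simp only [Bool.false_eq_true, if_false]
    have hbe : (c1 == c2) = false := beq_eq_false_iff_ne.mpr (Ne.symm hcc)
    have hfr := findA_eq_bcell rl c2 (hok c2 hc2 hcc)
    cases hff : bcell rl c2 with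
    | some ty =>
      simp only [getD_buildD, hc2, if_pos, hfr, hff, Option.getD_some, hbe,
        Bool.false_eq_true, if_false]
    | none => simp [getD_buildD, hc2, hfr, hff]

theorem outer_getD (comps : List String) (rs : List (String × List (List (String × String))))
    (m : PySem.Dict String (PySem.Dict String String))
    (hnd : (rs.map Prod.fst).Nodup) (c1 : String) (hc1 : c1 ∈ comps) :
    (rs.foldl (fun m p =>
        if (PySem.Set.ofList comps).contains p.1 then
          m.insert p.1 ((p.2.foldl (applyRowB (PySem.Set.ofList comps) p.1)
            (m.getD p.1 PySem.Dict.empty, PySem.Set.empty)).1)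
        else m) m).getD c1 PySem.Dict.empty
      = match (PySem.Dict.mk rs).get? c1 with
        | none => m.getD c1 PySem.Dict.empty
        | some rl => (rl.foldl (applyRowB (PySem.Set.ofList comps) c1)
            (m.getD c1 PySem.Dict.empty, PySem.Set.empty)).1 := by
  induction rs generalizing m with
  | nil => rfl
  | cons p rs ih =>
    obtain ⟨src, rl⟩ := p
    simp only [List.map_cons, List.nodup_cons] at hnd
    obtain ⟨hsrc, hnd'⟩ := hnd
    simp only [List.foldl_cons]
    by_cases hcs : c1 = src
    · subst hcs
      have hget : (PySem.Dict.mk ((c1, rl) :: rs)).get? c1 = some rl := by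
        rw [PySem.Dict.get?_mk_cons]; simp
      rw [hget]
      have hvc : (PySem.Set.ofList comps).contains c1 = true := by
        rw [contains_ofList]; exact decide_eq_true hc1
      simp only [hvc, if_pos]
      rw [ih _ hnd']
      have hnone : (PySem.Dict.mk rs).get? c1 = none := by
        rw [PySem.Dict.get?_eq_none_iff_not_mem_keys]
        simpa using hsrc
      rw [hnone, PySem.Dict.getD_insert_self]
    · have hget : (PySem.Dict.mk ((src, rl) :: rs)).get? c1 = (PySem.Dict.mk rs).get? c1 := by
        rw [PySem.Dict.get?_mk_cons]; rw [if_neg (fun (h : (src == c1) = true) => hcs (Eq.symm (eq_of_beq h)))]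
      rw [hget]
      by_cases hvc : (PySem.Set.ofList comps).contains src = true
      · simp only [hvc, if_pos]
        rw [ih _ hnd']
        rw [PySem.Dict.getD_insert_of_ne (hne := hcs)]
      · rw [if_neg hvc]
        exact ih m hnd'

theorem outer_keys (comps : List String) (rs : List (String × List (List (String × String))))
    (m : PySem.Dict String (PySem.Dict String String))
    (hk : m.keys = PySem.List.dedup comps) :
    (rs.foldl (fun m p =>
        if (PySem.Set.ofList comps).contains p.1 then
          m.insert p.1 ((p.2.foldl (applyRowB (PySem.Set.ofList comps) p.1)
            (m.getD p.1 PySem.Dict.empty, PySem.Set.empty)).1)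
        else m) m).keys = PySem.List.dedup comps := by
  induction rs generalizing m with
  | nil => exact hk
  | cons p rs ih =>
    simp only [List.foldl_cons]
    by_cases hvc : (PySem.Set.ofList comps).contains p.1 = true
    · simp only [hvc, if_pos]
      apply ih
      rw [PySem.Dict.keys_insert_of_contains, hk]
      rw [PySem.Dict.contains_iff_mem_keys, hk, PySem.List.mem_dedup]
      rw [contains_ofList] at hvc
      exact of_decide_eq_true hvc
    · rw [if_neg hvc]; exact ih m hk

theorem main_eq (rels : List (String × List (List (String × String)))) (comps : List String)
    (hnd : (rels.map Prod.fst).Nodup)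
    (hok : ∀ p ∈ rels, p.1 ∈ comps → ∀ c2 ∈ comps, c2 ≠ p.1 → rowColOK p.2 c2 = true) :
    create_relationship_matrix_py rels comps = create_relationship_matrix_py_alt rels comps := by
  have hA : create_relationship_matrix_py rels comps
      = (buildD comps (fun c1 => buildD comps (fun c2 =>
          if c1 == c2 then "self"
          else if (PySem.Dict.mk rels).contains c1 then
            findRelTypeA ((PySem.Dict.mk rels).getD c1 []) c2
          else "none") PySem.Dict.empty) PySem.Dict.empty).items.map (fun p => (p.1, p.2.items)) := rfl
  have hB : create_relationship_matrix_py_alt rels comps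
      = (rels.foldl (fun m p =>
          if (PySem.Set.ofList comps).contains p.1 then
            m.insert p.1 ((p.2.foldl (applyRowB (PySem.Set.ofList comps) p.1)
              (m.getD p.1 PySem.Dict.empty, PySem.Set.empty)).1)
          else m)
          (buildD comps (fun c1 => buildD comps (fun c2 =>
            if c1 == c2 then "self" else "none") PySem.Dict.empty) PySem.Dict.empty)).items.map
          (fun p => (p.1, p.2.items)) := rfl
  rw [hA, hB]
  congr 1
  -- the two matrices are equal as dicts
  have hkA := keys_buildD_empty comps (fun c1 => buildD comps (fun c2 =>
      if c1 == c2 then "self"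
      else if (PySem.Dict.mk rels).contains c1 then
        findRelTypeA ((PySem.Dict.mk rels).getD c1 []) c2
      else "none") PySem.Dict.empty)
  have hkB := outer_keys comps rels (buildD comps (fun c1 => buildD comps (fun c2 =>
      if c1 == c2 then "self" else "none") PySem.Dict.empty) PySem.Dict.empty)
      (keys_buildD_empty comps _)
  rw [PySem.Dict.items_eq_map_keys _ (by rw [hkA]; exact PySem.List.nodup_dedup _) PySem.Dict.empty,
      PySem.Dict.items_eq_map_keys _ (by rw [hkB]; exact PySem.List.nodup_dedup _) PySem.Dict.empty,
      hkA, hkB]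
  apply List.map_congr_left
  intro c1 hc1d
  have hc1 : c1 ∈ comps := (PySem.List.mem_dedup _ _).mp hc1d
  rw [getD_buildD]
  simp only [hc1, if_pos]
  rw [outer_getD comps rels _ hnd c1 hc1]
  cases hget : (PySem.Dict.mk rels).get? c1 with
  | none =>
    rw [getD_buildD]
    simp only [hc1, if_pos]
    have hcon : (PySem.Dict.mk rels).contains c1 = false := by
      rw [PySem.Dict.contains_eq_isSome_get?, hget]; rfl
    congr 1
    apply buildD_congr
    intro c2 _
    rw [hcon]
    simp
  | some rl =>
    rw [getD_buildD]
    simp only [hc1, if_pos]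
    have hmem : (c1, rl) ∈ rels := PySem.Dict.mem_items_of_get?_eq_some (PySem.Dict.mk rels) hget
    have hokr : ∀ c2 ∈ comps, c2 ≠ c1 → rowColOK rl c2 = true := hok (c1, rl) hmem hc1
    rw [row_eq comps c1 rl hc1 hokr]
    have hcon : (PySem.Dict.mk rels).contains c1 = true := by
      rw [PySem.Dict.contains_eq_isSome_get?, hget]; rfl
    have hgetD : (PySem.Dict.mk rels).getD c1 [] = rl := by
      rw [PySem.Dict.getD_eq_get?_getD, hget]; rfl
    congr 1
    apply buildD_congr
    intro c2 _
    rw [hcon, hgetD]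
    simp

-- ===== VERDICT (by name: the statement is the Claim_ definition above) =====
theorem create_relationship_matrix_py_spec : Claim_equal_create_relationship_matrix_py := by
  intro relationships component_names _hdom hpre
  exact main_eq relationships component_names hpre.1 hpre.2
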